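-- pv_equiv track=rewrite | github.com/leothomas/FactReasoner | src/fact_reasoner/atom_extractor.py | text_to_units
-- ===== SOURCE A (Python) =====
-- from typing import Any, List
--
-- def text_to_units(text: str, separator: str = "- ") -> List[str]:
--     """
--     Parse the input text into atomic units and their labels.
--
--     Args:
--         text: str
--             The input text containing atomic units.
--         separator: str
--             The separator used to identify the start of each atomic unit.
--
--     Returns:
--         List[str]: A list of atomic units.
--     """
--
--     parsed_units = []
--     parsed_labels = []
--     current_unit = []
--     preamble = True
--     for line in text.strip().splitlines():
--         line = line.strip()
--
--         if line.startswith(separator):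
--             if preamble:
--                 preamble = False
--             if current_unit:
--                 # Process the previous unit if it's completed
--                 full_unit = "\n".join(current_unit).strip()
--                 if ": " in full_unit:  # the format is - atomic unit: atomic unit type
--                     unit, label = full_unit.rsplit(": ", 1)
--                     parsed_units.append(unit.strip())
--                     parsed_labels.append(label.strip())
--                 else:  # the format is just - atomic unit
--                     unit, label = full_unit.strip(), "Fact"
--                     parsed_units.append(unit.strip())
--                     parsed_labels.append(label.strip())
--                 current_unit = []
--             # Add the new line to the current unit (without leading '- ')
--             current_unit.append(line[2:].strip())
--         else:
--             if preamble:
--                 continue  # skip preamble lines that do not start with '-'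
--             # Continue adding lines to the current unit
--             current_unit.append(line.strip())
--
--     # Process the last unit
--     if current_unit:
--         full_unit = "\n".join(current_unit).strip()
--         if ": " in full_unit:
--             unit, label = full_unit.rsplit(": ", 1)
--             parsed_units.append(unit.strip())
--             parsed_labels.append(label.strip())
--         else:
--             unit, label = full_unit.strip(), "Fact"
--             parsed_units.append(unit.strip())
--             parsed_labels.append(label.strip())
--
--     return parsed_units, parsed_labels
-- ===== SOURCE B (Python) =====
-- def _block_to_pair(block):
--     """Convert one unit block (list of lines) to a (unit, label) pair."""
--     full = "\n".join(block).strip()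
--     if ": " in full:
--         unit, label = full.rsplit(": ", 1)
--         return unit.strip(), label.strip()
--     return full, "Fact"
--
--
-- def text_to_units(text, separator="- "):
--     # Pass 1: group the lines into blocks, one block per atomic unit.
--     blocks = []
--     for raw in text.strip().splitlines():
--         line = raw.strip()
--         if line.startswith(separator):
--             blocks.append([line[2:].strip()])
--         elif blocks:
--             blocks[-1].append(line)
--     # Pass 2: convert each block once.
--     pairs = [_block_to_pair(b) for b in blocks]
--     return [u for u, _ in pairs], [l for _, l in pairs]
-- ===== Notes on version B (the rewrite author's own statement) =====
-- stated objective: simpler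
-- what changed: Replaces A's single stateful loop (preamble flag, in-loop flush plus a duplicated post-loop conversion of the open unit) with two staged passes: first group lines into blocks, then convert every block once with one helper.
import Mathlib
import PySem

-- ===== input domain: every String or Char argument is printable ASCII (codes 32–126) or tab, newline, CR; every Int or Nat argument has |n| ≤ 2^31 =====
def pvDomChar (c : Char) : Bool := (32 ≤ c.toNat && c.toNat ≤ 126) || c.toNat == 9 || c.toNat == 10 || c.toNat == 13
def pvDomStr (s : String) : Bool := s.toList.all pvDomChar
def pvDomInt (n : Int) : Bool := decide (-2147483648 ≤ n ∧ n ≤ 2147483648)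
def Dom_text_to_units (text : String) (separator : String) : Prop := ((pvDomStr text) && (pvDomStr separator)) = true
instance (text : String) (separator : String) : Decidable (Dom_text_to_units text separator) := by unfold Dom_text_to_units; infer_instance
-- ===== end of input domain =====

-- B replaces A's single stateful loop by two staged passes (group lines into blocks, then
-- convert each block once); equality of the return values is proved below.

-- ===== PORT A =====
-- 'full_unit.rsplit(": ", 1)' under 'if ": " in full_unit' splits at the LAST occurrence:
-- ported by hand via PySem.Str.rfind (exact there, since ": " is present).
def pvStepA (separator : String) (st : List String × List String × List String × Bool)
    (rawline : String) : List String × List String × List String × Bool :=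
  let parsed_units := st.1
  let parsed_labels := st.2.1
  let current_unit := st.2.2.1
  let preamble := st.2.2.2
  let line := PySem.Str.strip rawline
  if PySem.Str.startswith line separator then
    let preamble := false
    if current_unit ≠ [] then
      let full_unit := PySem.Str.strip (PySem.Str.join "\n" current_unit)
      if PySem.Str.isIn ": " full_unit then
        let i := PySem.Str.rfind full_unit ": "
        let unit := PySem.Str.slice full_unit none (some i)
        let label := PySem.Str.slice full_unit (some (i + 2)) none
        (parsed_units ++ [PySem.Str.strip unit], parsed_labels ++ [PySem.Str.strip label],
         [PySem.Str.strip (PySem.Str.slice line (some 2) none)], preamble)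
      else
        let unit := PySem.Str.strip full_unit
        let label := "Fact"
        (parsed_units ++ [PySem.Str.strip unit], parsed_labels ++ [PySem.Str.strip label],
         [PySem.Str.strip (PySem.Str.slice line (some 2) none)], preamble)
    else
      (parsed_units, parsed_labels, [PySem.Str.strip (PySem.Str.slice line (some 2) none)], preamble)
  else
    if preamble then st
    else (parsed_units, parsed_labels, current_unit ++ [PySem.Str.strip line], preamble)

def text_to_units (text : String) (separator : String) : List String × List String :=
  let st := (PySem.Str.splitlines (PySem.Str.strip text)).foldl (pvStepA separator) ([], [], [], true)
  let parsed_units := st.1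
  let parsed_labels := st.2.1
  let current_unit := st.2.2.1
  if current_unit ≠ [] then
    let full_unit := PySem.Str.strip (PySem.Str.join "\n" current_unit)
    if PySem.Str.isIn ": " full_unit then
      let i := PySem.Str.rfind full_unit ": "
      let unit := PySem.Str.slice full_unit none (some i)
      let label := PySem.Str.slice full_unit (some (i + 2)) none
      (parsed_units ++ [PySem.Str.strip unit], parsed_labels ++ [PySem.Str.strip label])
    else
      let unit := PySem.Str.strip full_unit
      let label := "Fact"
      (parsed_units ++ [PySem.Str.strip unit], parsed_labels ++ [PySem.Str.strip label])
  else (parsed_units, parsed_labels)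

-- ===== PORT B =====
-- helper _block_to_pair of Source B (rsplit(": ", 1) ported by hand via rfind, as on the A side)
def pvBlockToPair (block : List String) : String × String :=
  let full := PySem.Str.strip (PySem.Str.join "\n" block)
  if PySem.Str.isIn ": " full then
    let i := PySem.Str.rfind full ": "
    (PySem.Str.strip (PySem.Str.slice full none (some i)),
     PySem.Str.strip (PySem.Str.slice full (some (i + 2)) none))
  else (full, "Fact")

def pvStepB (separator : String) (blocks : List (List String)) (raw : String) :
    List (List String) :=
  let line := PySem.Str.strip raw
  if PySem.Str.startswith line separator then
    blocks ++ [[PySem.Str.strip (PySem.Str.slice line (some 2) none)]]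
  else if blocks ≠ [] then blocks.dropLast ++ [blocks.getLast! ++ [line]]
  else blocks

def text_to_units_alt (text : String) (separator : String) : List String × List String :=
  let blocks := (PySem.Str.splitlines (PySem.Str.strip text)).foldl (pvStepB separator) []
  let pairs := blocks.map pvBlockToPair
  (pairs.map Prod.fst, pairs.map Prod.snd)

-- ===== PRECONDITION & SPEC =====
def Spec_text_to_units (text : String) (separator : String) (out : List String × List String) : Prop := out = text_to_units_alt text separator
instance (text : String) (separator : String) (out : List String × List String) : Decidable (Spec_text_to_units text separator out) := by unfold Spec_text_to_units; infer_instance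

-- ===== CLAIM (what is proved, stated in full; the proofs are below) =====
def Claim_equal_text_to_units : Prop := ∀ (text : String) (separator : String), Dom_text_to_units text separator → Spec_text_to_units text separator (text_to_units text separator)

-- ===== LEMMAS AND PROOFS =====


theorem pv_dropWhile_prefix_self {p : Char → Bool} {t u : List Char}
    (hu : u <+: t) (ht : t.dropWhile p = t) : u.dropWhile p = u := by
  cases u with
  | nil => simp
  | cons a u' =>
    obtain ⟨r, hr⟩ := hu
    have hpa : p a = false := by
      cases h : p a with
      | false => rfl
      | true =>
        exfalso
        rw [← hr, List.cons_append] at ht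
        simp only [List.dropWhile_cons, h, if_true] at ht
        have hlen := congrArg List.length ht
        have := List.length_dropWhile_le p (u' ++ r)
        simp at hlen this
        omega
    simp [hpa]

theorem chars_strip_strip (s : List Char) :
    PySem.Chars.strip (PySem.Chars.strip s) = PySem.Chars.strip s := by
  have h1 : List.dropWhile PySem.Chars.isspace (List.dropWhile PySem.Chars.isspace s) =
      List.dropWhile PySem.Chars.isspace s := List.dropWhile_idempotent _ s
  have hpre : (List.dropWhile PySem.Chars.isspace
      (List.dropWhile PySem.Chars.isspace s).reverse).reverse <+:
      List.dropWhile PySem.Chars.isspace s := by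
    have hsuf := List.dropWhile_suffix (l := (List.dropWhile PySem.Chars.isspace s).reverse)
      PySem.Chars.isspace
    simpa using List.reverse_prefix.mpr hsuf
  have h2 := pv_dropWhile_prefix_self hpre h1
  simp [PySem.Chars.strip, PySem.Chars.rstrip, PySem.Chars.lstrip, h2,
    List.reverse_reverse, List.dropWhile_idempotent]

theorem strip_strip (s : String) : PySem.Str.strip (PySem.Str.strip s) = PySem.Str.strip s := by
  simp only [PySem.Str.strip]
  rw [show (String.ofList (PySem.Chars.strip s.toList)).toList = PySem.Chars.strip s.toList from by
    simp, chars_strip_strip]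

theorem pv_strip_Fact : PySem.Str.strip "Fact" = "Fact" := by decide

-- A's post-loop flush, factored for the proofs (text_to_units's body is definitionally
-- pvFinishA of its fold state)
def pvFinishA (st : List String × List String × List String × Bool) : List String × List String :=
  let parsed_units := st.1
  let parsed_labels := st.2.1
  let current_unit := st.2.2.1
  if current_unit ≠ [] then
    let full_unit := PySem.Str.strip (PySem.Str.join "\n" current_unit)
    if PySem.Str.isIn ": " full_unit then
      let i := PySem.Str.rfind full_unit ": "
      (parsed_units ++ [PySem.Str.strip (PySem.Str.slice full_unit none (some i))],
       parsed_labels ++ [PySem.Str.strip (PySem.Str.slice full_unit (some (i + 2)) none)])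
    else
      (parsed_units ++ [PySem.Str.strip (PySem.Str.strip full_unit)],
       parsed_labels ++ [PySem.Str.strip "Fact"])
  else (parsed_units, parsed_labels)

theorem text_to_units_eq_finish (text separator : String) :
    text_to_units text separator =
      pvFinishA ((PySem.Str.splitlines (PySem.Str.strip text)).foldl (pvStepA separator)
        ([], [], [], true)) := rfl

-- flushing a (nonempty) unit appends exactly B's pair for that block
theorem flush_eq (pu pl : List String) (cu : List String) (hcu : cu ≠ []) :
    pvFinishA (pu, pl, cu, false) =
      (pu ++ [(pvBlockToPair cu).1], pl ++ [(pvBlockToPair cu).2]) := by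
  unfold pvFinishA pvBlockToPair
  simp only [hcu, ne_eq, not_false_eq_true, if_true]
  split_ifs with h
  · rfl
  · rw [strip_strip, strip_strip, pv_strip_Fact]

-- on a separator line, A flushes the open unit and seeds a new one
theorem stepA_sep (sep line : String) (pu pl cu : List String) (b : Bool) (hcu : cu ≠ [])
    (hs : PySem.Str.startswith (PySem.Str.strip line) sep = true) :
    pvStepA sep (pu, pl, cu, b) line =
      (pu ++ [(pvBlockToPair cu).1], pl ++ [(pvBlockToPair cu).2],
       [PySem.Str.strip (PySem.Str.slice (PySem.Str.strip line) (some 2) none)], false) := by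
  unfold pvStepA pvBlockToPair
  simp only [hs, hcu, ne_eq, not_false_eq_true, if_true]
  split_ifs with h
  · rfl
  · rw [strip_strip, strip_strip, pv_strip_Fact]

-- the main loop invariant: A's fold state from a processed-blocks prefix bs and open unit cu
theorem main_loop (lines : List String) (sep : String) (bs : List (List String)) (cu : List String)
    (hcu : cu ≠ []) :
    pvFinishA (lines.foldl (pvStepA sep)
      ((bs.map pvBlockToPair).map Prod.fst, (bs.map pvBlockToPair).map Prod.snd, cu, false)) =
    (((lines.foldl (pvStepB sep) (bs ++ [cu])).map pvBlockToPair).map Prod.fst,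
     ((lines.foldl (pvStepB sep) (bs ++ [cu])).map pvBlockToPair).map Prod.snd) := by
  induction lines generalizing bs cu with
  | nil =>
    simp only [List.foldl_nil]
    rw [flush_eq _ _ _ hcu]
    simp
  | cons line rest ih =>
    simp only [List.foldl_cons]
    by_cases hs : PySem.Str.startswith (PySem.Str.strip line) sep = true
    · rw [stepA_sep sep line _ _ _ _ hcu hs]
      have hB : pvStepB sep (bs ++ [cu]) line =
          (bs ++ [cu]) ++ [[PySem.Str.strip (PySem.Str.slice (PySem.Str.strip line) (some 2) none)]] := by
        unfold pvStepB
        rw [if_pos hs]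
      rw [hB]
      have := ih (bs ++ [cu]) [PySem.Str.strip (PySem.Str.slice (PySem.Str.strip line) (some 2) none)]
        (by simp)
      simpa [List.map_append] using this
    · have hA : pvStepA sep (((bs.map pvBlockToPair).map Prod.fst),
          ((bs.map pvBlockToPair).map Prod.snd), cu, false) line =
          (((bs.map pvBlockToPair).map Prod.fst), ((bs.map pvBlockToPair).map Prod.snd),
           cu ++ [PySem.Str.strip line], false) := by
        unfold pvStepA
        rw [if_neg hs, if_neg (by simp : ¬(false = true)), strip_strip]
      have hB : pvStepB sep (bs ++ [cu]) line = bs ++ [cu ++ [PySem.Str.strip line]] := by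
        unfold pvStepB
        rw [if_neg hs, if_pos (by simp : bs ++ [cu] ≠ []), List.dropLast_concat]
        rw [show (bs ++ [cu]).getLast! = cu from by
          simp only [List.getLast!_eq_getLast?_getD, List.getLast?_append,
            List.getLast?_singleton, Option.some_or, Option.getD_some]]
      rw [hA, hB]
      exact ih bs (cu ++ [PySem.Str.strip line]) (by simp)

-- the preamble phase: nothing accumulated yet on either side
theorem pre_loop (lines : List String) (sep : String) :
    pvFinishA (lines.foldl (pvStepA sep) ([], [], [], true)) =
    (((lines.foldl (pvStepB sep) []).map pvBlockToPair).map Prod.fst,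
     ((lines.foldl (pvStepB sep) []).map pvBlockToPair).map Prod.snd) := by
  induction lines with
  | nil => simp [pvFinishA]
  | cons line rest ih =>
    simp only [List.foldl_cons]
    by_cases hs : PySem.Str.startswith (PySem.Str.strip line) sep = true
    · have hA : pvStepA sep ([], [], [], true) line =
          ([], [], [PySem.Str.strip (PySem.Str.slice (PySem.Str.strip line) (some 2) none)], false) := by
        unfold pvStepA
        rw [if_pos hs, if_neg (by simp : ¬(([] : List String) ≠ []))]
      have hB : pvStepB sep [] line =
          [[PySem.Str.strip (PySem.Str.slice (PySem.Str.strip line) (some 2) none)]] := by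
        unfold pvStepB
        rw [if_pos hs]
        rfl
      rw [hA, hB]
      have := main_loop rest sep []
        [PySem.Str.strip (PySem.Str.slice (PySem.Str.strip line) (some 2) none)] (by simp)
      simpa using this
    · have hA : pvStepA sep ([], [], [], true) line = ([], [], [], true) := by
        unfold pvStepA
        rw [if_neg hs, if_pos rfl]
      have hB : pvStepB sep [] line = [] := by
        unfold pvStepB
        rw [if_neg hs, if_neg (by simp : ¬(([] : List (List String)) ≠ []))]
      rw [hA, hB]
      exact ih

-- ===== VERDICT (by name: the statement is the Claim_ definition above) =====
theorem text_to_units_spec : Claim_equal_text_to_units := by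
  intro text separator _
  unfold Spec_text_to_units text_to_units_alt
  rw [text_to_units_eq_finish, pre_loop]
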